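-- pv_equiv track=rewrite | github.com/DemetriusChatterjee/IMDB2.0 | backend_api.py | parse_analysis_features
-- ===== SOURCE A (Python) =====
-- def parse_gemini_analysis(analysis_text):
--     """
--     Parse the structured Gemini analysis to extract specific features
--     """
--     if not analysis_text:
--         return {}
--
--     features = {
--         'visual_style': [],
--         'narrative_arc': [],
--         'audio_landscape': [],
--         'emotional_vibe': []
--     }
--
--     # Parse the structured sections
--     sections = {
--         '[VISUAL_STYLE]': 'visual_style',
--         '[NARRATIVE_ARC]': 'narrative_arc',
--         '[AUDIO_LANDSCAPE]': 'audio_landscape',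
--         '[EMOTIONAL_VIBE]': 'emotional_vibe'
--     }
--
--     for section_marker, key in sections.items():
--         if section_marker in analysis_text:
--             # Find the section content
--             start_idx = analysis_text.find(section_marker) + len(section_marker)
--             end_idx = analysis_text.find('[', start_idx)
--             if end_idx == -1:
--                 end_idx = len(analysis_text)
--
--             section_content = analysis_text[start_idx:end_idx].strip()
--             if section_content.startswith(':'):
--                 section_content = section_content[1:].strip()
--
--             # Split by common delimiters and clean up
--             items = []
--             for delimiter in [',', ';']:
--                 if delimiter in section_content:
--                     items = [item.strip() for item in section_content.split(delimiter)]
--                     break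
--
--             if not items and section_content:
--                 items = [section_content]
--
--             # Clean and filter items
--             for item in items:
--                 if item and len(item.strip()) > 3:  # Filter out very short items
--                     clean_item = item.strip().rstrip('.')
--                     if clean_item:
--                         features[key].append({
--                             'type': key.replace('_', ' '),
--                             'value': clean_item
--                         })
--
--     return features
--
-- def parse_analysis_features(analysis_text, analysis_type):
--     """
--     Parse AI analysis text to extract specific features
--     """
--     if not analysis_text:
--         return []
--
--     if analysis_type == 'narrative':
--         # For narrative, parse the Gemini structured analysis
--         parsed = parse_gemini_analysis(analysis_text)
--         features = []
--         for category, items in parsed.items():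
--             features.extend(items)
--         return features
--
--     elif analysis_type == 'visual':
--         # For visual analysis, we don't have detailed text usually, so return generic info
--         return [{'type': 'feature', 'value': 'CLIP visual embeddings + Color histograms'}]
--
--     elif analysis_type == 'audio':
--         # For audio analysis, we don't have detailed text usually, so return generic info
--         return [{'type': 'feature', 'value': 'Tempo detection + Spectral contrast analysis'}]
--
--     return []
-- ===== SOURCE B (Python) =====
-- # B: one split('[') pass tokenizes the text; each section body is the token after
-- # its 'NAME]' head (token boundaries ARE the next-'[' boundaries), first token only.
-- _SECTIONS = [('VISUAL_STYLE', 'visual style'), ('NARRATIVE_ARC', 'narrative arc'),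
--              ('AUDIO_LANDSCAPE', 'audio landscape'), ('EMOTIONAL_VIBE', 'emotional vibe')]
--
-- def _section_feats(typ, body):
--     content = body.strip()
--     if content.startswith(':'):
--         content = content[1:].strip()
--     delim = ',' if ',' in content else ';'
--     return [{'type': typ, 'value': it.strip().rstrip('.')}
--             for it in content.split(delim)
--             if len(it.strip()) > 3 and it.strip().rstrip('.')]
--
-- def parse_analysis_features(analysis_text, analysis_type):
--     if not analysis_text:
--         return []
--     if analysis_type == 'narrative':
--         tokens = analysis_text.split('[')[1:]
--         feats = []
--         for name, typ in _SECTIONS: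
--             head = name + ']'
--             body = next((t[len(head):] for t in tokens if t.startswith(head)), None)
--             if body is not None:
--                 feats.extend(_section_feats(typ, body))
--         return feats
--     if analysis_type == 'visual':
--         return [{'type': 'feature', 'value': 'CLIP visual embeddings + Color histograms'}]
--     if analysis_type == 'audio':
--         return [{'type': 'feature', 'value': 'Tempo detection + Spectral contrast analysis'}]
--     return []
-- ===== Notes on version B (the rewrite author's own statement) =====
-- stated objective: alternative
-- what changed: B replaces A's per-marker find/find('[')/slice scans over the whole text by one split('[') tokenization: each section body is exactly the token following its 'NAME]' head (token boundaries are the next-'[' boundaries), taken at its first occurrence, then cleaned in one comprehension instead of A's map-strip pass plus nested-if loop and dict accumulation.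
import Mathlib
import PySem

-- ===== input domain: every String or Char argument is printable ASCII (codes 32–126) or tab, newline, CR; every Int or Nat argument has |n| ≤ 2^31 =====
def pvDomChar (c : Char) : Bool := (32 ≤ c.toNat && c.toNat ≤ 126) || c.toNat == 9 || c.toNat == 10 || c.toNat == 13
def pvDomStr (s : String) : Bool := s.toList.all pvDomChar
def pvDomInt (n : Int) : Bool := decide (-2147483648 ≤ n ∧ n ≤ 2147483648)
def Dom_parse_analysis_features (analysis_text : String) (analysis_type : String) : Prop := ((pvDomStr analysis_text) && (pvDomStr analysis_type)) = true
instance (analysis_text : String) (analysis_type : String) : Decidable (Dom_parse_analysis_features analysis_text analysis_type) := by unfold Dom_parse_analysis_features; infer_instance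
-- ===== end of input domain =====

-- B tokenizes the text once with split('[') (each section body = the token after its 'NAME]'
-- head) instead of A's per-marker find/slice scans and dict accumulation; same return value.


-- exact port of Python's s.rstrip('.') (PySem has no chars-argument rstrip); used by both ports
def pvRstripDot (cs : List Char) : List Char := (cs.reverse.dropWhile (· == '.')).reverse

-- ===== PORT A =====
-- the 'sections' dict literal of A, as an assoc list in insertion order (keys distinct)
def pgSections : List (String × String) :=
  [("[VISUAL_STYLE]", "visual_style"), ("[NARRATIVE_ARC]", "narrative_arc"),
   ("[AUDIO_LANDSCAPE]", "audio_landscape"), ("[EMOTIONAL_VIBE]", "emotional_vibe")]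

-- one iteration of A's 'for section_marker, key in sections.items()' loop body
def pgSectionStep (analysis_text : String)
    (features : PySem.Dict String (List (List (String × String))))
    (section_marker key : String) : PySem.Dict String (List (List (String × String))) :=
  if PySem.Str.isIn section_marker analysis_text then
    let start_idx : Int := PySem.Str.find analysis_text section_marker + PySem.Str.len section_marker
    let end_idx0 : Int := PySem.Str.findFrom analysis_text "[" start_idx
    let end_idx : Int := if end_idx0 = -1 then PySem.Str.len analysis_text else end_idx0
    let section_content := PySem.Str.strip (PySem.Str.slice analysis_text (some start_idx) (some end_idx))
    let section_content := if PySem.Str.startswith section_content ":" then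
        PySem.Str.strip (PySem.Str.slice section_content (some 1) none) else section_content
    -- 'for delimiter in [',', ';']: if delimiter in …: items = […]; break'
    let items : List String :=
      if PySem.Str.isIn "," section_content then
        ((PySem.Str.split? section_content ",").getD []).map PySem.Str.strip
      else if PySem.Str.isIn ";" section_content then
        ((PySem.Str.split? section_content ";").getD []).map PySem.Str.strip
      else []
    let items := if items = [] ∧ section_content ≠ "" then [section_content] else items
    items.foldl (fun d item =>
      if item ≠ "" ∧ 3 < PySem.Str.len (PySem.Str.strip item) then
        let clean_item := String.ofList (pvRstripDot (PySem.Str.strip item).toList)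
        if clean_item ≠ "" then
          d.modify key [] (· ++ [[("type", PySem.Str.replace key "_" " "), ("value", clean_item)]])
        else d
      else d) features
  else features

def parse_gemini_analysis (analysis_text : String) :
    PySem.Dict String (List (List (String × String))) :=
  if analysis_text = "" then PySem.Dict.empty
  else
    let features : PySem.Dict String (List (List (String × String))) :=
      PySem.Dict.ofList [("visual_style", []), ("narrative_arc", []),
                         ("audio_landscape", []), ("emotional_vibe", [])]
    pgSections.foldl (fun d mk => pgSectionStep analysis_text d mk.1 mk.2) features

def parse_analysis_features (analysis_text : String) (analysis_type : String) :
    List (List (String × String)) :=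
  if analysis_text = "" then []
  else if analysis_type = "narrative" then
    (parse_gemini_analysis analysis_text).items.foldl (fun acc kv => acc ++ kv.2) []
  else if analysis_type = "visual" then
    [[("type", "feature"), ("value", "CLIP visual embeddings + Color histograms")]]
  else if analysis_type = "audio" then
    [[("type", "feature"), ("value", "Tempo detection + Spectral contrast analysis")]]
  else []

-- ===== PORT B =====
def pvAltSections : List (String × String) :=
  [("VISUAL_STYLE", "visual style"), ("NARRATIVE_ARC", "narrative arc"),
   ("AUDIO_LANDSCAPE", "audio landscape"), ("EMOTIONAL_VIBE", "emotional vibe")]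

def pvAltSectionFeats (typ body : String) : List (List (String × String)) :=
  let content := PySem.Str.strip body
  let content := if PySem.Str.startswith content ":" then
      PySem.Str.strip (PySem.Str.slice content (some 1) none) else content
  let delim := if PySem.Str.isIn "," content then "," else ";"
  ((PySem.Str.split? content delim).getD []).filterMap (fun it =>
    if 3 < PySem.Str.len (PySem.Str.strip it) ∧
        String.ofList (pvRstripDot (PySem.Str.strip it).toList) ≠ "" then
      some [("type", typ), ("value", String.ofList (pvRstripDot (PySem.Str.strip it).toList))]
    else none)

def parse_analysis_features_alt (analysis_text : String) (analysis_type : String) :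
    List (List (String × String)) :=
  if analysis_text = "" then []
  else if analysis_type = "narrative" then
    let tokens := ((PySem.Str.split? analysis_text "[").getD []).tail
    pvAltSections.foldl (fun feats nk =>
      let head := nk.1 ++ "]"
      match (tokens.find? (fun t => PySem.Str.startswith t head)).map
          (fun t => PySem.Str.slice t (some (PySem.Str.len head)) none) with
      | some body => feats ++ pvAltSectionFeats nk.2 body
      | none => feats) []
  else if analysis_type = "visual" then
    [[("type", "feature"), ("value", "CLIP visual embeddings + Color histograms")]]
  else if analysis_type = "audio" then
    [[("type", "feature"), ("value", "Tempo detection + Spectral contrast analysis")]]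
  else []

-- ===== PRECONDITION & SPEC =====
def Spec_parse_analysis_features (analysis_text : String) (analysis_type : String) (out : List (List (String × String))) : Prop := out = parse_analysis_features_alt analysis_text analysis_type
instance (analysis_text : String) (analysis_type : String) (out : List (List (String × String))) : Decidable (Spec_parse_analysis_features analysis_text analysis_type out) := by unfold Spec_parse_analysis_features; infer_instance

-- ===== CLAIM (what is proved, stated in full; the proofs are below) =====
def Claim_equal_parse_analysis_features : Prop := ∀ (analysis_text : String) (analysis_type : String), Dom_parse_analysis_features analysis_text analysis_type → Spec_parse_analysis_features analysis_text analysis_type (parse_analysis_features analysis_text analysis_type)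

-- ===== LEMMAS AND PROOFS =====

def spc (ch : Char) : List Char → List Char × List (List Char)
  | [] => ([], [])
  | c :: r => if c = ch then ([], (spc ch r).1 :: (spc ch r).2) else (c :: (spc ch r).1, (spc ch r).2)

theorem go_spc (ch : Char) : ∀ (fuel : Nat) (l cur : List Char) (acc : List (List Char)),
    l.length < fuel →
    PySem.Chars.splitOn.go [ch] fuel l cur acc
      = acc.reverse ++ ((cur.reverse ++ (spc ch l).1) :: (spc ch l).2) := by
  intro fuel
  induction fuel with
  | zero => intro l cur acc h; simp at h
  | succ n ih =>
    intro l cur acc h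
    rw [PySem.Chars.splitOn.go.eq_def]
    cases l with
    | nil => simp [spc]
    | cons c rest =>
      simp only
      by_cases hc : ch = c
      · subst hc
        have hp : List.isPrefixOf [ch] (ch :: rest) = true := by simp [List.isPrefixOf]
        simp only [hp, if_true]
        rw [ih _ _ _ (by simp at h ⊢; omega)]
        simp [spc]
      · have hp : List.isPrefixOf [ch] (c :: rest) = false := by
          simp [List.isPrefixOf]; exact fun hh => hc hh
        simp only [hp, Bool.false_eq_true, if_false]
        rw [ih _ _ _ (by simp at h ⊢; omega)]
        have hc' : ¬ c = ch := fun hh => hc hh.symm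
        simp [spc, hc']

theorem splitOn_single (ch : Char) (l : List Char) :
    PySem.Chars.splitOn l [ch] = (spc ch l).1 :: (spc ch l).2 := by
  unfold PySem.Chars.splitOn
  rw [go_spc ch (l.length+1) l [] [] (by omega)]
  simp

theorem spc_join (ch : Char) (l : List Char) :
    l = (spc ch l).1 ++ ((spc ch l).2).flatMap (fun p => ch :: p) := by
  induction l with
  | nil => simp [spc]
  | cons c r ih =>
    by_cases hc : c = ch
    · subst hc; simp [spc]; exact ih
    · simp [spc, hc]; exact ih

theorem spc_not_mem₁ (ch : Char) (l : List Char) : ch ∉ (spc ch l).1 := by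
  induction l with
  | nil => simp [spc]
  | cons c r ih =>
    by_cases hc : c = ch
    · subst hc; simp [spc]
    · simp [spc, hc]; exact ⟨fun hh => hc hh.symm, ih⟩

theorem spc_of_not_mem (ch : Char) (l : List Char) (h : ch ∉ l) : spc ch l = (l, []) := by
  induction l with
  | nil => simp [spc]
  | cons c r ih =>
    simp at h
    have hc' : ¬ c = ch := fun hh => h.1 hh.symm
    simp [spc, hc', ih h.2]

theorem singleton_infix_iff_mem (ch : Char) (l : List Char) : [ch] <:+: l ↔ ch ∈ l := by
  constructor
  · intro h; exact h.mem (by simp)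
  · intro h
    obtain ⟨a, b, rfl⟩ := List.mem_iff_append.mp h
    exact ⟨a, b, by simp⟩

theorem find_eq_of (sub l : List Char) (k : Nat)
    (h1 : sub <+: l.drop k) (h2 : ∀ i, i < k → ¬ sub <+: l.drop i) :
    PySem.Chars.find l sub = (k : Int) := by
  have hin : PySem.Chars.isIn sub l = true :=
    (PySem.Chars.exists_prefix_drop_iff_isIn _ _).mp ⟨k, h1⟩
  have hinf : sub <:+: l := (PySem.Chars.isIn_iff_infix _ _).mp hin
  have hnn : 0 ≤ PySem.Chars.find l sub := (PySem.Chars.find_nonneg_iff _ _).mpr hinf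
  obtain ⟨hpre, hmin⟩ := PySem.Chars.find_spec (s := l) (sub := sub) hnn
  set f := (PySem.Chars.find l sub).toNat with hf
  rcases Nat.lt_trichotomy f k with hlt | heq | hgt
  · exact absurd hpre (h2 f hlt)
  · rw [← heq]; omega
  · exact absurd h1 (hmin k hgt)

theorem find_zero_of_prefix (sub l : List Char) (h : sub <+: l) :
    PySem.Chars.find l sub = 0 := by
  have := find_eq_of sub l 0 (by simpa using h) (by omega)
  simpa using this

theorem find_cons (c : Char) (r sub : List Char) (h : ¬ sub <+: (c :: r)) :
    PySem.Chars.find (c :: r) sub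
      = if PySem.Chars.isIn sub r then 1 + PySem.Chars.find r sub else -1 := by
  by_cases hin : PySem.Chars.isIn sub r = true
  · rw [if_pos hin]
    have hinf : sub <:+: r := (PySem.Chars.isIn_iff_infix _ _).mp hin
    have hnn : 0 ≤ PySem.Chars.find r sub := (PySem.Chars.find_nonneg_iff _ _).mpr hinf
    obtain ⟨hpre, hmin⟩ := PySem.Chars.find_spec (s := r) (sub := sub) hnn
    set k := (PySem.Chars.find r sub).toNat with hk
    have : PySem.Chars.find (c :: r) sub = ((k + 1 : Nat) : Int) := by
      apply find_eq_of
      · simpa using hpre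
      · intro i hi
        cases i with
        | zero => simpa using h
        | succ j => intro hj; exact hmin j (by omega) (by simpa using hj)
    rw [this]; push_cast; omega
  · rw [if_neg (by simpa using hin)]
    apply (PySem.Chars.find_eq_neg_one_iff _ _).mpr
    rw [List.infix_cons_iff]
    push Not
    exact ⟨h, fun hh => hin ((PySem.Chars.isIn_iff_infix _ _).mpr hh)⟩

theorem isIn_cons (c : Char) (r sub : List Char) (h : ¬ sub <+: (c :: r)) :
    PySem.Chars.isIn sub (c :: r) = PySem.Chars.isIn sub r := by
  by_cases hin : PySem.Chars.isIn sub r = true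
  · rw [hin]
    exact (PySem.Chars.isIn_iff_infix _ _).mpr
      (List.infix_cons_iff.mpr (Or.inr ((PySem.Chars.isIn_iff_infix _ _).mp hin)))
  · simp only [Bool.not_eq_true] at hin
    rw [hin]
    apply (PySem.Chars.isIn_eq_false_iff _ _).mpr
    rw [List.infix_cons_iff]
    push Not
    exact ⟨h, fun hh => absurd ((PySem.Chars.isIn_iff_infix _ _).mpr hh) (by simp [hin])⟩

theorem takeWhile_eq_self_of_not_mem (ch : Char) (d : List Char) (h : ch ∉ d) :
    d.takeWhile (· ≠ ch) = d := by
  induction d with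
  | nil => simp
  | cons c r ih =>
    simp at h
    have hc : ¬ c = ch := fun hh => h.1 hh.symm
    rw [List.takeWhile_cons, if_pos (by simpa using hc), ih h.2]

theorem take_eq_takeWhile_aux (ch : Char) : ∀ (d : List Char) (k : Nat),
    [ch] <+: d.drop k → (∀ i, i < k → ¬ [ch] <+: d.drop i) →
    d.take k = d.takeWhile (· ≠ ch) := by
  intro d
  induction d with
  | nil => intro k h1 _; rw [List.drop_nil] at h1; exact absurd (List.eq_nil_of_prefix_nil h1) (by simp)
  | cons c r ih =>
    intro k h1 h2
    cases k with
    | zero =>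
      rw [List.drop_zero] at h1
      obtain ⟨t, ht⟩ := h1
      have hcch : c = ch := by
        have := congrArg (List.head? ·) ht
        simpa using this.symm
      simp [hcch]
    | succ k' =>
      have hc : ¬ c = ch := by
        have := h2 0 (by omega)
        simp at this
        intro hh; exact this hh.symm
      simp only [List.take_succ_cons, List.takeWhile_cons]
      rw [if_pos (by simpa using hc)]
      rw [ih k' (by simpa using h1) (fun i hi => by
        have := h2 (i+1) (by omega); simpa using this)]

theorem prefix_of_append_lb (nm1 p0 t : List Char) (hnb : '[' ∉ nm1)
    (h : nm1 <+: p0 ++ '[' :: t) : nm1 <+: p0 := by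
  induction p0 generalizing nm1 with
  | nil =>
    cases nm1 with
    | nil => simp
    | cons a nm =>
      obtain ⟨u, hu⟩ := h
      simp at hu
      exact absurd (hu.1 ▸ List.mem_cons_self) hnb
  | cons b p ih =>
    cases nm1 with
    | nil => simp
    | cons a nm =>
      obtain ⟨u, hu⟩ := h
      simp at hu
      obtain ⟨rfl, hu2⟩ := hu
      simp at hnb
      exact (List.prefix_cons_inj a).mpr (ih nm hnb.2 ⟨u, hu2⟩)

theorem takeWhile_append_of_forall (p : Char → Bool) (a b : List Char)
    (ha : ∀ x ∈ a, p x) (hb : b.takeWhile p = []) :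
    (a ++ b).takeWhile p = a := by
  induction a with
  | nil => simpa using hb
  | cons c r ih =>
    simp at ha
    simp [ha.1, ih ha.2]

theorem dropWhile_idem (p : Char → Bool) (l : List Char) :
    (l.dropWhile p).dropWhile p = l.dropWhile p := by
  induction l with
  | nil => simp
  | cons c r ih =>
    by_cases hc : p c
    · simp [hc, ih]
    · simp [hc]

theorem rstrip_prefix (l : List Char) : PySem.Chars.rstrip l <+: l := by
  have h := List.dropWhile_suffix (l := l.reverse) (p := PySem.Chars.isspace)
  have := List.reverse_prefix.mpr h
  simpa [PySem.Chars.rstrip] using this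

theorem lstrip_head_not_space (l : List Char) :
    (PySem.Chars.lstrip l).takeWhile PySem.Chars.isspace = [] := by
  unfold PySem.Chars.lstrip
  induction l with
  | nil => simp
  | cons c r ih =>
    by_cases hc : PySem.Chars.isspace c
    · simpa [hc] using ih
    · simp [hc]

theorem chars_strip_idem (l : List Char) :
    PySem.Chars.strip (PySem.Chars.strip l) = PySem.Chars.strip l := by
  unfold PySem.Chars.strip
  -- strip l = rstrip (lstrip l); show lstrip of it = it, then rstrip idem
  have h1 : PySem.Chars.lstrip (PySem.Chars.rstrip (PySem.Chars.lstrip l))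
      = PySem.Chars.rstrip (PySem.Chars.lstrip l) := by
    have hpre := rstrip_prefix (PySem.Chars.lstrip l)
    -- head of lstrip l is not a space; rstrip keeps the prefix
    unfold PySem.Chars.lstrip at *
    cases hr : PySem.Chars.rstrip (l.dropWhile PySem.Chars.isspace) with
    | nil => simp
    | cons c r =>
      rw [hr] at hpre
      have hc : PySem.Chars.isspace c = false := by
        have hh := lstrip_head_not_space l
        unfold PySem.Chars.lstrip at hh
        cases hd : l.dropWhile PySem.Chars.isspace with
        | nil => rw [hd] at hpre; exact absurd hpre (by simp)
        | cons c' r' =>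
          rw [hd] at hpre hh
          have hcc : c = c' := by
            obtain ⟨u, hu⟩ := hpre
            have := congrArg List.head? hu
            simpa using this
          rw [List.takeWhile_cons] at hh
          subst hcc
          by_contra hcon
          simp only [Bool.not_eq_false] at hcon
          rw [if_pos hcon] at hh
          simp at hh
      simp [hc]
  rw [h1]
  -- rstrip idempotent
  have : ∀ m : List Char, PySem.Chars.rstrip (PySem.Chars.rstrip m) = PySem.Chars.rstrip m := by
    intro m
    unfold PySem.Chars.rstrip
    simp [dropWhile_idem]
  exact this _
theorem flat_takeWhile (ps : List (List Char)) :
    (ps.flatMap (fun p => '[' :: p)).takeWhile (· ≠ '[') = [] := by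
  cases ps with
  | nil => simp
  | cons p rest => simp

theorem drop_no_lb (j : Nat) (p0 : List Char) (h : '[' ∉ p0) :
    ∀ x ∈ p0.drop j, (x ≠ '[' : Bool) := by
  intro x hx
  have : x ∈ p0 := (List.drop_sublist j p0).mem hx
  simp
  exact fun hh => h (hh ▸ this)

theorem master (nm1 : List Char) (_hne : nm1 ≠ []) (hnb : '[' ∉ nm1) : ∀ (l : List Char),
    ((spc '[' l).2.find? (fun t => nm1.isPrefixOf t)).map (fun t => t.drop nm1.length)
    = if PySem.Chars.isIn ('[' :: nm1) l
      then some ((l.drop ((PySem.Chars.find l ('[' :: nm1)).toNat + nm1.length + 1)).takeWhile (· ≠ '['))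
      else none := by
  intro l
  induction l with
  | nil =>
    have : PySem.Chars.isIn ('[' :: nm1) [] = false := by
      apply (PySem.Chars.isIn_eq_false_iff _ _).mpr
      intro hh
      have := List.eq_nil_of_infix_nil hh
      simp at this
    simp [spc, this]
  | cons c r ih =>
    by_cases hc : c = '['
    · subst hc
      by_cases hpre : nm1 <+: r
      · -- marker is a prefix of l
        have hmp : ('[' :: nm1) <+: ('[' :: r) := (List.prefix_cons_inj _).mpr hpre
        have hin : PySem.Chars.isIn ('[' :: nm1) ('[' :: r) = true := by
          apply (PySem.Chars.isIn_iff_infix _ _).mpr hmp.isInfix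
        have hfind := find_zero_of_prefix _ _ hmp
        -- spc on '['::r
        have hsp : spc '[' ('[' :: r) = ([], (spc '[' r).1 :: (spc '[' r).2) := by simp [spc]
        have hjoin := spc_join '[' r
        set p0 := (spc '[' r).1 with hp0
        set ps := (spc '[' r).2 with hps
        have hp0pre : nm1 <+: p0 := by
          cases hq : ps with
          | nil => rw [hq] at hjoin; simp at hjoin; exact hjoin ▸ hpre
          | cons q qs =>
            apply prefix_of_append_lb nm1 p0 (q ++ qs.flatMap (fun p => '[' :: p)) hnb
            rw [hq] at hjoin; simp at hjoin
            exact hjoin ▸ hpre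
        have hlen : nm1.length ≤ p0.length := hp0pre.length_le
        rw [hsp]
        rw [List.find?_cons_of_pos (by simpa [List.isPrefixOf_iff_prefix] using hp0pre)]
        rw [hfind]
        simp only [hin, if_true, Option.map_some]
        congr 1
        have hdrop : ('[' :: r).drop ((0 : Int).toNat + nm1.length + 1) = r.drop nm1.length := by
          simp
        rw [hdrop]
        conv_rhs => rw [hjoin]
        rw [List.drop_append_of_le_length hlen]
        rw [takeWhile_append_of_forall _ _ _ (drop_no_lb _ _ (spc_not_mem₁ '[' r)) (flat_takeWhile _)]
      · -- not prefix: recurse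
        have hnp : ¬ ('[' :: nm1) <+: ('[' :: r) := fun hh => hpre ((List.prefix_cons_inj _).mp hh)
        have hsp : spc '[' ('[' :: r) = ([], (spc '[' r).1 :: (spc '[' r).2) := by simp [spc]
        have hp0npre : ¬ nm1 <+: (spc '[' r).1 := by
          intro hh
          apply hpre
          have hjoin := spc_join '[' r
          calc nm1 <+: (spc '[' r).1 := hh
            _ <+: r := by conv_rhs => rw [hjoin]
                          exact List.prefix_append _ _
        rw [hsp]
        rw [List.find?_cons_of_neg (by simpa [List.isPrefixOf_iff_prefix] using hp0npre)]
        rw [ih]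
        rw [isIn_cons _ _ _ hnp, find_cons _ _ _ hnp]
        by_cases hin : PySem.Chars.isIn ('[' :: nm1) r = true
        · rw [hin]
          simp only [if_true]
          congr 1
          have hnn : 0 ≤ PySem.Chars.find r ('[' :: nm1) :=
            (PySem.Chars.find_nonneg_iff _ _).mpr ((PySem.Chars.isIn_iff_infix _ _).mp hin)
          have : (1 + PySem.Chars.find r ('[' :: nm1)).toNat
              = (PySem.Chars.find r ('[' :: nm1)).toNat + 1 := by omega
          rw [this]
          have h2 : (PySem.Chars.find r ('[' :: nm1)).toNat + 1 + nm1.length + 1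
              = ((PySem.Chars.find r ('[' :: nm1)).toNat + nm1.length + 1) + 1 := by omega
          rw [h2, List.drop_succ_cons]
        · simp only [Bool.not_eq_true] at hin
          rw [hin]
          simp
    · -- c ≠ '['
      have hnp : ¬ ('[' :: nm1) <+: (c :: r) := by
        intro hh
        obtain ⟨u, hu⟩ := hh
        simp at hu
        exact hc hu.1.symm
      have hsp : spc '[' (c :: r) = (c :: (spc '[' r).1, (spc '[' r).2) := by simp [spc, hc]
      rw [hsp]
      simp only
      rw [ih, isIn_cons _ _ _ hnp, find_cons _ _ _ hnp]
      by_cases hin : PySem.Chars.isIn ('[' :: nm1) r = true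
      · rw [hin]
        simp only [if_true]
        congr 1
        have hnn : 0 ≤ PySem.Chars.find r ('[' :: nm1) :=
          (PySem.Chars.find_nonneg_iff _ _).mpr ((PySem.Chars.isIn_iff_infix _ _).mp hin)
        have : (1 + PySem.Chars.find r ('[' :: nm1)).toNat
            = (PySem.Chars.find r ('[' :: nm1)).toNat + 1 := by omega
        rw [this]
        have h2 : (PySem.Chars.find r ('[' :: nm1)).toNat + 1 + nm1.length + 1
            = ((PySem.Chars.find r ('[' :: nm1)).toNat + nm1.length + 1) + 1 := by omega
        rw [h2, List.drop_succ_cons]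
      · simp only [Bool.not_eq_true] at hin
        rw [hin]
        simp

-- ---- Str-level strip idempotence ----
theorem str_strip_idem (s : String) :
    PySem.Str.strip (PySem.Str.strip s) = PySem.Str.strip s := by
  apply String.toList_inj.mp
  rw [PySem.Str.toList_strip, PySem.Str.toList_strip, chars_strip_idem]

-- ---- A's item-cleaning step as an Option-valued function ----
def entryFn (key : String) (item : String) : Option (List (String × String)) :=
  if item ≠ "" ∧ 3 < PySem.Str.len (PySem.Str.strip item) then
    (if String.ofList (pvRstripDot (PySem.Str.strip item).toList) ≠ "" then
      some [("type", PySem.Str.replace key "_" " "),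
            ("value", String.ofList (pvRstripDot (PySem.Str.strip item).toList))]
     else none)
  else none

def bFn (typ : String) (it : String) : Option (List (String × String)) :=
  if 3 < PySem.Str.len (PySem.Str.strip it) ∧
      String.ofList (pvRstripDot (PySem.Str.strip it).toList) ≠ "" then
    some [("type", typ), ("value", String.ofList (pvRstripDot (PySem.Str.strip it).toList))]
  else none

theorem len_pos_ne_empty (s : String) (h : 3 < PySem.Str.len s) : s ≠ "" := by
  intro hh
  subst hh
  simp [PySem.Str.len_eq] at h

theorem entryFn_strip_eq_bFn (key typ it : String) (htyp : PySem.Str.replace key "_" " " = typ) :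
    entryFn key (PySem.Str.strip it) = bFn typ it := by
  unfold entryFn bFn
  rw [str_strip_idem, htyp]
  by_cases h3 : 3 < PySem.Str.len (PySem.Str.strip it)
  · have hne : PySem.Str.strip it ≠ "" := len_pos_ne_empty _ h3
    by_cases hcl : String.ofList (pvRstripDot (PySem.Str.strip it).toList) ≠ ""
    · rw [if_pos ⟨hne, h3⟩, if_pos hcl, if_pos ⟨h3, hcl⟩]
    · rw [if_pos ⟨hne, h3⟩, if_neg hcl, if_neg (fun hh => hcl hh.2)]
  · rw [if_neg (fun hh => h3 hh.2), if_neg (fun hh => h3 hh.1)]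

-- split? by a one-character separator, as Strings
theorem str_split_char (c : String) (sep : String) (ch : Char) (hsep : sep.toList = [ch]) :
    ∃ ts : List String, PySem.Str.split? c sep = some ts ∧ ts ≠ [] ∧
      ts.map String.toList = (spc ch c.toList).1 :: (spc ch c.toList).2 := by
  have hmap := PySem.Str.split?_map c sep
  rw [hsep] at hmap
  unfold PySem.Chars.split? at hmap
  rw [if_neg (by simp)] at hmap
  rw [splitOn_single] at hmap
  cases hs : PySem.Str.split? c sep with
  | none => rw [hs] at hmap; simp at hmap
  | some ts =>
    rw [hs] at hmap
    simp only [Option.map_some, Option.some.injEq] at hmap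
    refine ⟨ts, rfl, ?_, hmap⟩
    intro hh
    rw [hh] at hmap
    simp at hmap

theorem split_not_mem_self (c : String) (sep : String) (ch : Char) (hsep : sep.toList = [ch])
    (h : PySem.Str.isIn sep c = false) :
    PySem.Str.split? c sep = some [c] := by
  have hnm : ch ∉ c.toList := by
    rw [PySem.Str.isIn_eq, hsep] at h
    intro hm
    exact absurd ((PySem.Chars.isIn_iff_infix _ _).mpr ((singleton_infix_iff_mem ch _).mpr hm))
      (by simp [h])
  obtain ⟨ts, hs, hne, hm⟩ := str_split_char c sep ch hsep
  rw [spc_of_not_mem ch _ hnm] at hm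
  cases ts with
  | nil => simp at hm
  | cons t rest =>
    simp at hm
    obtain ⟨ht, hr⟩ := hm
    rw [hs, hr, String.toList_inj.mp ht]

-- ---- the cleaning-pipeline equality ----
theorem clean_eq (key typ c : String) (htyp : PySem.Str.replace key "_" " " = typ)
    (hstrip : PySem.Str.strip c = c) :
    (let items : List String :=
        if PySem.Str.isIn "," c then ((PySem.Str.split? c ",").getD []).map PySem.Str.strip
        else if PySem.Str.isIn ";" c then ((PySem.Str.split? c ";").getD []).map PySem.Str.strip
        else []
     let items2 := if items = [] ∧ c ≠ "" then [c] else items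
     items2.filterMap (entryFn key))
    = ((PySem.Str.split? c (if PySem.Str.isIn "," c then "," else ";")).getD []).filterMap (bFn typ) := by
  by_cases h1 : PySem.Str.isIn "," c
  · obtain ⟨ts, hs, hne, hm⟩ := str_split_char c "," ',' (by decide)
    simp only [h1, if_true, hs, Option.getD_some]
    rw [if_neg (by simp [hne])]
    rw [List.filterMap_map]
    apply List.filterMap_congr
    intro it _
    exact entryFn_strip_eq_bFn key typ it htyp
  · simp only [h1, Bool.false_eq_true, if_false]
    by_cases h2 : PySem.Str.isIn ";" c
    · obtain ⟨ts, hs, hne, hm⟩ := str_split_char c ";" ';' (by decide)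
      simp only [h2, if_true, hs, Option.getD_some]
      rw [if_neg (by simp [hne])]
      rw [List.filterMap_map]
      apply List.filterMap_congr
      intro it _
      exact entryFn_strip_eq_bFn key typ it htyp
    · simp only [h2, Bool.false_eq_true, if_false]
      rw [split_not_mem_self c ";" ';' (by decide) (by simpa using h2)]
      simp only [Option.getD_some]
      by_cases hc0 : c = ""
      · subst hc0
        rw [if_neg (by simp)]
        have hb : bFn typ "" = none := by
          unfold bFn
          rw [if_neg]
          intro hcon
          exact absurd hcon.1 (by decide)
        simp [hb]
      · have heq : entryFn key c = bFn typ c := by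
          have := entryFn_strip_eq_bFn key typ c htyp
          rwa [hstrip] at this
        rw [if_pos (⟨trivial, hc0⟩ : True ∧ ¬c = ""), List.filterMap_cons, List.filterMap_cons, heq]
        cases hb : bFn typ c <;> simp

-- ---- A-side raw slice characterization ----
theorem sliceA_eq (text marker : String)
    (hin : PySem.Chars.isIn marker.toList text.toList = true) :
    (PySem.Str.slice text (some (PySem.Str.find text marker + PySem.Str.len marker))
      (some (if PySem.Str.findFrom text "[" (PySem.Str.find text marker + PySem.Str.len marker) = -1
             then PySem.Str.len text
             else PySem.Str.findFrom text "[" (PySem.Str.find text marker + PySem.Str.len marker)))).toList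
    = ((text.toList.drop ((PySem.Chars.find text.toList marker.toList).toNat + marker.toList.length)).takeWhile (· ≠ '[')) := by
  set l := text.toList with hl
  set m := marker.toList with hmm
  have hinf : m <:+: l := (PySem.Chars.isIn_iff_infix _ _).mp hin
  have hnn : 0 ≤ PySem.Chars.find l m := (PySem.Chars.find_nonneg_iff _ _).mpr hinf
  obtain ⟨hpre, _⟩ := PySem.Chars.find_spec (s := l) (sub := m) hnn
  set f := (PySem.Chars.find l m).toNat with hf
  set k := f + m.length with hk
  have hkl : k ≤ l.length := by
    have h1 := hpre.length_le
    rw [List.length_drop] at h1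
    have h2 := PySem.Chars.find_le_length l m
    omega
  have hstart : PySem.Str.find text marker + PySem.Str.len marker = ((k : Nat) : Int) := by
    rw [PySem.Str.find_eq, PySem.Str.len_eq, ← hl, ← hmm, hk]
    push_cast
    omega
  have hff : PySem.Str.findFrom text "[" (PySem.Str.find text marker + PySem.Str.len marker)
      = PySem.Chars.findFrom l ['['] ((k : Nat) : Int) := by
    rw [PySem.Str.findFrom_eq, hstart, ← hl]
    rfl
  rw [PySem.Chars.findFrom_natCast l ['['] k hkl] at hff
  set d := l.drop k with hd
  by_cases hg : PySem.Chars.find d ['['] = -1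
  · rw [hff, if_pos (by rw [if_pos hg])]
    rw [hstart, PySem.Str.len_eq, ← hl]
    rw [PySem.Str.toList_slice, PySem.Chars.slice_eq_listSlice, PySem.List.slice_natCast]
    have hnm : '[' ∉ d := by
      intro hmem
      exact absurd ((PySem.Chars.isIn_iff_infix _ _).mpr ((singleton_infix_iff_mem '[' _).mpr hmem))
        (by simp [PySem.Chars.isIn, hg])
    rw [takeWhile_eq_self_of_not_mem _ _ hnm, ← hd]
    apply List.take_of_length_le
    rw [List.length_drop]
  · have hgn : 0 ≤ PySem.Chars.find d ['['] := by
      have := PySem.Chars.neg_one_le_find d ['[']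
      omega
    set g := (PySem.Chars.find d ['[']).toNat with hgg
    have hfind : PySem.Chars.find d ['['] = (g : Int) := by omega
    have he : PySem.Str.findFrom text "[" (PySem.Str.find text marker + PySem.Str.len marker)
        = (((k + g : Nat) : Nat) : Int) := by
      rw [hff, if_neg hg, hfind]; push_cast; ring
    rw [he]
    have hne : (((k + g : Nat) : Nat) : Int) ≠ -1 := by omega
    rw [if_neg hne, hstart]
    rw [PySem.Str.toList_slice, PySem.Chars.slice_eq_listSlice, PySem.List.slice_natCast, ← hd]
    have : k + g - k = g := by omega
    rw [this]
    obtain ⟨hp2, hm2⟩ := PySem.Chars.find_spec (s := d) (sub := ['[']) hgn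
    rw [← hgg] at hp2
    exact take_eq_takeWhile_aux '[' d g hp2 (fun i hi => hm2 i (by omega))

-- ---- A's section content and entry list ----
def contentA (text marker : String) : String :=
  let start_idx : Int := PySem.Str.find text marker + PySem.Str.len marker
  let end_idx0 : Int := PySem.Str.findFrom text "[" start_idx
  let end_idx : Int := if end_idx0 = -1 then PySem.Str.len text else end_idx0
  let s := PySem.Str.strip (PySem.Str.slice text (some start_idx) (some end_idx))
  if PySem.Str.startswith s ":" then PySem.Str.strip (PySem.Str.slice s (some 1) none) else s

def itemsA (c : String) : List String :=
  let items : List String :=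
    if PySem.Str.isIn "," c then ((PySem.Str.split? c ",").getD []).map PySem.Str.strip
    else if PySem.Str.isIn ";" c then ((PySem.Str.split? c ";").getD []).map PySem.Str.strip
    else []
  if items = [] ∧ c ≠ "" then [c] else items

def sectionAList (text marker key : String) : List (List (String × String)) :=
  if PySem.Str.isIn marker text then (itemsA (contentA text marker)).filterMap (entryFn key)
  else []

-- ---- Dict bookkeeping for A's inner loop ----
theorem fold_getD (key : String) (items : List String) :
    ∀ (d : PySem.Dict String (List (List (String × String)))) (k : String),
    (items.foldl (fun d item =>
      if item ≠ "" ∧ 3 < PySem.Str.len (PySem.Str.strip item) then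
        (if String.ofList (pvRstripDot (PySem.Str.strip item).toList) ≠ "" then
          d.modify key [] (· ++ [[("type", PySem.Str.replace key "_" " "),
            ("value", String.ofList (pvRstripDot (PySem.Str.strip item).toList))]])
         else d)
      else d) d).getD k []
    = d.getD k [] ++ (if k = key then items.filterMap (entryFn key) else []) := by
  induction items with
  | nil => intro d k; simp
  | cons it rest ih =>
    intro d k
    rw [List.foldl_cons, ih]
    by_cases hk : k = key
    · rw [hk, if_pos rfl, if_pos rfl, List.filterMap_cons]
      by_cases h1 : it ≠ "" ∧ 3 < PySem.Str.len (PySem.Str.strip it)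
      · rw [if_pos h1]
        by_cases h2 : String.ofList (pvRstripDot (PySem.Str.strip it).toList) ≠ ""
        · rw [if_pos h2, PySem.Dict.getD_modify_self]
          have he : entryFn key it = some [("type", PySem.Str.replace key "_" " "),
              ("value", String.ofList (pvRstripDot (PySem.Str.strip it).toList))] := by
            unfold entryFn; rw [if_pos h1, if_pos h2]
          rw [he]
          simp
        · have he : entryFn key it = none := by
            unfold entryFn; rw [if_pos h1, if_neg h2]
          rw [if_neg h2, he]
      · have he : entryFn key it = none := by
          unfold entryFn; rw [if_neg h1]
        rw [if_neg h1, he]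
    · rw [if_neg hk, if_neg hk]
      by_cases h1 : it ≠ "" ∧ 3 < PySem.Str.len (PySem.Str.strip it)
      · rw [if_pos h1]
        by_cases h2 : String.ofList (pvRstripDot (PySem.Str.strip it).toList) ≠ ""
        · rw [if_pos h2, PySem.Dict.getD_modify_of_ne _ _ _ hk]
        · rw [if_neg h2]
      · rw [if_neg h1]

theorem fold_keys (key : String) (items : List String) :
    ∀ (d : PySem.Dict String (List (List (String × String)))),
    d.contains key = true →
    (items.foldl (fun d item =>
      if item ≠ "" ∧ 3 < PySem.Str.len (PySem.Str.strip item) then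
        (if String.ofList (pvRstripDot (PySem.Str.strip item).toList) ≠ "" then
          d.modify key [] (· ++ [[("type", PySem.Str.replace key "_" " "),
            ("value", String.ofList (pvRstripDot (PySem.Str.strip item).toList))]])
         else d)
      else d) d).keys = d.keys := by
  induction items with
  | nil => intro d _; simp
  | cons it rest ih =>
    intro d hc
    rw [List.foldl_cons]
    have hkeys : ∀ (f : List (List (String × String)) → List (List (String × String))),
        (d.modify key [] f).keys = d.keys ∧ (d.modify key [] f).contains key = true := by
      intro f
      constructor
      · rw [PySem.Dict.keys_modify, PySem.Dict.keys_insert_of_contains]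
        exact hc
      · rw [PySem.Dict.contains_modify]; simp
    by_cases h1 : it ≠ "" ∧ 3 < PySem.Str.len (PySem.Str.strip it)
    · rw [if_pos h1]
      by_cases h2 : String.ofList (pvRstripDot (PySem.Str.strip it).toList) ≠ ""
      · rw [if_pos h2, ih _ (hkeys _).2, (hkeys _).1]
      · rw [if_neg h2, ih _ hc]
    · rw [if_neg h1, ih _ hc]

theorem step_getD (text : String) (d : PySem.Dict String (List (List (String × String))))
    (marker key k : String) :
    (pgSectionStep text d marker key).getD k []
    = d.getD k [] ++ (if k = key then sectionAList text marker key else []) := by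
  unfold pgSectionStep sectionAList
  by_cases hin : PySem.Str.isIn marker text
  · rw [if_pos hin, if_pos hin]
    rw [fold_getD]
    by_cases hk : k = key
    · rw [if_pos hk, if_pos hk]
      rfl
    · rw [if_neg hk, if_neg hk]
  · rw [if_neg hin, if_neg hin]
    simp

theorem step_keys (text : String) (d : PySem.Dict String (List (List (String × String))))
    (marker key : String) (hc : d.contains key = true) :
    (pgSectionStep text d marker key).keys = d.keys := by
  unfold pgSectionStep
  by_cases hin : PySem.Str.isIn marker text
  · rw [if_pos hin]
    exact fold_keys key _ _ hc
  · rw [if_neg hin]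

-- ---- B's per-section contribution ----
def secB (text : String) (name typ : String) : List (List (String × String)) :=
  match ((((PySem.Str.split? text "[").getD []).tail).find?
      (fun t => PySem.Str.startswith t (name ++ "]"))).map
      (fun t => PySem.Str.slice t (some (PySem.Str.len (name ++ "]"))) none) with
  | some body => pvAltSectionFeats typ body
  | none => []

theorem foldl_secB (text : String) : ∀ (l : List (String × String)) (acc : List (List (String × String))),
    l.foldl (fun feats nk =>
      match ((((PySem.Str.split? text "[").getD []).tail).find?
          (fun t => PySem.Str.startswith t (nk.1 ++ "]"))).map
          (fun t => PySem.Str.slice t (some (PySem.Str.len (nk.1 ++ "]"))) none) with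
      | some body => feats ++ pvAltSectionFeats nk.2 body
      | none => feats) acc
    = acc ++ l.flatMap (fun nk => secB text nk.1 nk.2) := by
  intro l
  induction l with
  | nil => intro acc; simp
  | cons nk rest ih =>
    intro acc
    rw [List.foldl_cons, ih]
    have hsec : (match ((((PySem.Str.split? text "[").getD []).tail).find?
          (fun t => PySem.Str.startswith t (nk.1 ++ "]"))).map
          (fun t => PySem.Str.slice t (some (PySem.Str.len (nk.1 ++ "]"))) none) with
        | some body => acc ++ pvAltSectionFeats nk.2 body
        | none => acc)
        = acc ++ secB text nk.1 nk.2 := by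
      unfold secB
      cases hq : ((((PySem.Str.split? text "[").getD []).tail).find?
          (fun t => PySem.Str.startswith t (nk.1 ++ "]"))).map
          (fun t => PySem.Str.slice t (some (PySem.Str.len (nk.1 ++ "]"))) none) with
      | none => simp
      | some body => simp
    rw [hsec, List.flatMap_cons, List.append_assoc]

-- ---- the per-section equality ----
theorem section_eq (text marker name key typ : String) (nm1 : List Char)
    (hm : marker.toList = '[' :: nm1) (hh : (name ++ "]").toList = nm1)
    (hne : nm1 ≠ []) (hnb : '[' ∉ nm1)
    (htyp : PySem.Str.replace key "_" " " = typ) :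
    sectionAList text marker key = secB text name typ := by
  obtain ⟨ts, hs, htne, hmap⟩ := str_split_char text "[" '[' (by decide)
  obtain ⟨t0, trest, rfl⟩ : ∃ t0 trest, ts = t0 :: trest := by
    cases ts with
    | nil => exact absurd rfl htne
    | cons a b => exact ⟨a, b, rfl⟩
  simp only [List.map_cons, List.cons.injEq] at hmap
  obtain ⟨ht0, htr⟩ := hmap
  have hpred : ∀ t : String, (PySem.Str.startswith t (name ++ "]"))
      = nm1.isPrefixOf t.toList := by
    intro t
    rw [PySem.Str.startswith_eq, hh]
    rfl
  have hfind : (trest.find? (fun t => PySem.Str.startswith t (name ++ "]"))).map String.toList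
      = (spc '[' text.toList).2.find? (fun t => nm1.isPrefixOf t) := by
    rw [← htr, List.find?_map]
    congr 1
    simp only [hpred]
    rfl
  have hmaster := master nm1 hne hnb text.toList
  rw [← hfind] at hmaster
  unfold secB sectionAList
  rw [hs]
  simp only [Option.getD_some, List.tail_cons]
  have hisin : PySem.Str.isIn marker text = PySem.Chars.isIn ('[' :: nm1) text.toList := by
    rw [PySem.Str.isIn_eq, hm]
  cases hq : trest.find? (fun t => PySem.Str.startswith t (name ++ "]")) with
  | none =>
    rw [hq] at hmaster
    simp only [Option.map_none] at hmaster
    have : PySem.Chars.isIn ('[' :: nm1) text.toList = false := by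
      by_contra hcon
      simp only [Bool.not_eq_false] at hcon
      rw [if_pos hcon] at hmaster
      simp at hmaster
    rw [if_neg (by rw [PySem.Str.isIn_eq, hm, this]; simp)]
    simp
  | some t =>
    rw [hq] at hmaster
    simp only [Option.map_some] at hmaster
    have hin : PySem.Chars.isIn ('[' :: nm1) text.toList = true := by
      by_contra hcon
      simp only [Bool.not_eq_true] at hcon
      rw [if_neg (by simp [hcon])] at hmaster
      simp at hmaster
    rw [if_pos (by rw [PySem.Str.isIn_eq, hm]; exact hin)]
    rw [if_pos hin] at hmaster
    simp only [Option.some.injEq] at hmaster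
    simp only [Option.map_some]
    -- the raw bodies agree
    have hlen : PySem.Str.len (name ++ "]") = ((nm1.length : Nat) : Int) := by
      rw [PySem.Str.len_eq, hh]
    have hbody : (PySem.Str.slice t (some (PySem.Str.len (name ++ "]"))) none).toList
        = t.toList.drop nm1.length := by
      rw [hlen, PySem.Str.toList_slice, PySem.Chars.slice_eq_listSlice,
        PySem.List.slice_from_natCast]
    have hinm : PySem.Chars.isIn marker.toList text.toList = true := by rw [hm]; exact hin
    have hA := sliceA_eq text marker hinm
    have hmlen : marker.toList.length = nm1.length + 1 := by rw [hm]; simp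
    -- strip of A's slice equals strip of B's body (as Strings)
    have hstripEq : PySem.Str.strip
        (PySem.Str.slice text (some (PySem.Str.find text marker + PySem.Str.len marker))
          (some (if PySem.Str.findFrom text "[" (PySem.Str.find text marker + PySem.Str.len marker) = -1
                 then PySem.Str.len text
                 else PySem.Str.findFrom text "[" (PySem.Str.find text marker + PySem.Str.len marker))))
        = PySem.Str.strip (PySem.Str.slice t (some (PySem.Str.len (name ++ "]"))) none) := by
      apply String.toList_inj.mp
      rw [PySem.Str.toList_strip, PySem.Str.toList_strip, hA, hbody, hmaster, hmlen]
      have hfm : PySem.Chars.find text.toList marker.toList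
          = PySem.Chars.find text.toList ('[' :: nm1) := by rw [hm]
      rw [hfm]
      ring_nf
    -- now both pipelines coincide
    unfold contentA itemsA pvAltSectionFeats
    simp only
    rw [hstripEq]
    set s0 := PySem.Str.strip (PySem.Str.slice t (some (PySem.Str.len (name ++ "]"))) none) with hs0
    by_cases hcolon : PySem.Str.startswith s0 ":"
    · rw [if_pos hcolon]
      exact clean_eq key typ _ htyp (str_strip_idem _)
    · rw [if_neg hcolon]
      exact clean_eq key typ _ htyp (str_strip_idem _)

-- ---- assembling the narrative branch ----
theorem narrative_eq (text : String) (htext : text ≠ "") :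
    (parse_gemini_analysis text).items.foldl (fun acc kv => acc ++ kv.2) []
    = pvAltSections.foldl (fun feats nk =>
        match ((((PySem.Str.split? text "[").getD []).tail).find?
            (fun t => PySem.Str.startswith t (nk.1 ++ "]"))).map
            (fun t => PySem.Str.slice t (some (PySem.Str.len (nk.1 ++ "]"))) none) with
        | some body => feats ++ pvAltSectionFeats nk.2 body
        | none => feats) [] := by
  rw [foldl_secB]
  unfold parse_gemini_analysis
  rw [if_neg htext]
  set d0 : PySem.Dict String (List (List (String × String))) :=
    PySem.Dict.ofList [("visual_style", []), ("narrative_arc", []),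
                       ("audio_landscape", []), ("emotional_vibe", [])] with hd0
  simp only [pgSections, List.foldl_cons, List.foldl_nil]
  set d1 := pgSectionStep text d0 "[VISUAL_STYLE]" "visual_style" with hd1
  set d2 := pgSectionStep text d1 "[NARRATIVE_ARC]" "narrative_arc" with hd2
  set d3 := pgSectionStep text d2 "[AUDIO_LANDSCAPE]" "audio_landscape" with hd3
  set d4 := pgSectionStep text d3 "[EMOTIONAL_VIBE]" "emotional_vibe" with hd4
  have hk0 : d0.keys = ["visual_style", "narrative_arc", "audio_landscape", "emotional_vibe"] := by
    rw [hd0]; decide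
  have hc0 : ∀ key ∈ d0.keys, d0.contains key = true := by
    rw [hd0]; decide
  have hk1 : d1.keys = d0.keys := step_keys _ _ _ _ (hc0 _ (by rw [hk0]; simp))
  have hc1 : ∀ key ∈ d0.keys, d1.contains key = true := by
    intro key hkey
    rw [PySem.Dict.contains_iff_mem_keys, hk1]
    rw [← PySem.Dict.contains_iff_mem_keys]
    exact hc0 _ hkey
  have hk2 : d2.keys = d0.keys := by
    rw [hd2, step_keys _ _ _ _ (hc1 _ (by rw [hk0]; simp))]; exact hk1
  have hc2 : ∀ key ∈ d0.keys, d2.contains key = true := by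
    intro key hkey
    rw [PySem.Dict.contains_iff_mem_keys, hk2, ← PySem.Dict.contains_iff_mem_keys]
    exact hc0 _ hkey
  have hk3 : d3.keys = d0.keys := by
    rw [hd3, step_keys _ _ _ _ (hc2 _ (by rw [hk0]; simp))]; exact hk2
  have hc3 : ∀ key ∈ d0.keys, d3.contains key = true := by
    intro key hkey
    rw [PySem.Dict.contains_iff_mem_keys, hk3, ← PySem.Dict.contains_iff_mem_keys]
    exact hc0 _ hkey
  have hk4 : d4.keys = d0.keys := by
    rw [hd4, step_keys _ _ _ _ (hc3 _ (by rw [hk0]; simp))]; exact hk3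
  have hnd : d4.keys.Nodup := by rw [hk4, hk0]; decide
  have hitems := PySem.Dict.items_eq_map_keys d4 hnd []
  rw [hitems, hk4, hk0]
  -- compute the four getD values
  have hgv : ∀ k : String,
      d4.getD k [] = d0.getD k []
        ++ (if k = "visual_style" then sectionAList text "[VISUAL_STYLE]" "visual_style" else [])
        ++ (if k = "narrative_arc" then sectionAList text "[NARRATIVE_ARC]" "narrative_arc" else [])
        ++ (if k = "audio_landscape" then sectionAList text "[AUDIO_LANDSCAPE]" "audio_landscape" else [])
        ++ (if k = "emotional_vibe" then sectionAList text "[EMOTIONAL_VIBE]" "emotional_vibe" else []) := by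
    intro k
    rw [hd4, step_getD, hd3, step_getD, hd2, step_getD, hd1, step_getD]
  have hg1 := hgv "visual_style"
  have hg2 := hgv "narrative_arc"
  have hg3 := hgv "audio_landscape"
  have hg4 := hgv "emotional_vibe"
  simp only [if_true] at hg1 hg2 hg3 hg4
  rw [if_neg (by decide), if_neg (by decide), if_neg (by decide)] at hg1
  rw [if_neg (by decide), if_neg (by decide), if_neg (by decide)] at hg2
  rw [if_neg (by decide), if_neg (by decide), if_neg (by decide)] at hg3
  rw [if_neg (by decide), if_neg (by decide), if_neg (by decide)] at hg4
  have e1 : d0.getD "visual_style" [] = [] := by rw [hd0]; decide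
  have e2 : d0.getD "narrative_arc" [] = [] := by rw [hd0]; decide
  have e3 : d0.getD "audio_landscape" [] = [] := by rw [hd0]; decide
  have e4 : d0.getD "emotional_vibe" [] = [] := by rw [hd0]; decide
  simp only [List.map_cons, List.map_nil, List.foldl_cons, List.foldl_nil]
  rw [hg1, hg2, hg3, hg4, e1, e2, e3, e4]
  simp only [pvAltSections, List.flatMap_cons, List.flatMap_nil]
  rw [section_eq text "[VISUAL_STYLE]" "VISUAL_STYLE" "visual_style" "visual style"
      ("VISUAL_STYLE]".toList) (by decide) (by decide) (by decide) (by decide) (by decide)]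
  rw [section_eq text "[NARRATIVE_ARC]" "NARRATIVE_ARC" "narrative_arc" "narrative arc"
      ("NARRATIVE_ARC]".toList) (by decide) (by decide) (by decide) (by decide) (by decide)]
  rw [section_eq text "[AUDIO_LANDSCAPE]" "AUDIO_LANDSCAPE" "audio_landscape" "audio landscape"
      ("AUDIO_LANDSCAPE]".toList) (by decide) (by decide) (by decide) (by decide) (by decide)]
  rw [section_eq text "[EMOTIONAL_VIBE]" "EMOTIONAL_VIBE" "emotional_vibe" "emotional vibe"
      ("EMOTIONAL_VIBE]".toList) (by decide) (by decide) (by decide) (by decide) (by decide)]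
  simp

-- ===== VERDICT (by name: the statement is the Claim_ definition above) =====
theorem parse_analysis_features_spec : Claim_equal_parse_analysis_features := by
  intro analysis_text analysis_type _
  unfold Spec_parse_analysis_features
  unfold parse_analysis_features parse_analysis_features_alt
  by_cases htext : analysis_text = ""
  · rw [if_pos htext, if_pos htext]
  · rw [if_neg htext, if_neg htext]
    by_cases hty : analysis_type = "narrative"
    · rw [if_pos hty, if_pos hty]
      exact narrative_eq analysis_text htext
    · rw [if_neg hty, if_neg hty]
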